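-- pv_equiv track=rewrite | github.com/AlgorithmSTUDYing/Algorithm | Algos/Yein/[Lv2]전화번호 목록.py | solution
-- ===== SOURCE A (Python) =====
-- def solution(clothes):
--     answer = 'true'
--     length=len(clothes)
--
--     for i in range (0,length):
--         if(answer=='false'):
--             break
--         for j in range (0,length):
--             if i!=j and len(clothes[i])<=len(clothes[j]):
--                 if clothes[i]==clothes[j][:len(clothes[i])]:
--                     answer='false'
--                     break;
--     return answer
-- ===== SOURCE B (Python) =====
-- def solution(clothes):
--     seen = set(clothes)
--     if len(seen) != len(clothes):
--         return 'false'
--     for t in clothes: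
--         for k in range(len(t)):
--             if t[:k] in seen:
--                 return 'false'
--     return 'true'
-- ===== Notes on version B (the rewrite author's own statement) =====
-- stated objective: alternative
-- what changed: Replaces A's all-pairs index scan (compare every ordered pair i,j for a prefix match, with early break) with a hash-set of the strings: duplicates are detected by comparing set and list sizes, then each string's proper prefixes are looked up in the set.
import Mathlib
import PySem

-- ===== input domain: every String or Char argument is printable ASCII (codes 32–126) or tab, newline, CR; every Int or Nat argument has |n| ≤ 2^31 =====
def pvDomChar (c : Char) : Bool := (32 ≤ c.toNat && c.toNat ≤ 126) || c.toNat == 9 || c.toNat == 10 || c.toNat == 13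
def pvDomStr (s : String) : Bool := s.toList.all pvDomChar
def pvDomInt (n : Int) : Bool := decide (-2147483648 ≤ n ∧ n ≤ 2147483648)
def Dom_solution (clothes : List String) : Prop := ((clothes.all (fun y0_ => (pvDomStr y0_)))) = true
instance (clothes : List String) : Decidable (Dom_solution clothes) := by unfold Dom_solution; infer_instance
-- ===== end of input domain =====

-- B replaces A's all-pairs prefix scan by a hash-set of the strings: duplicates are caught by
-- comparing set and list sizes, then every proper prefix of each string is looked up in the set.

-- ===== PORT A =====
-- inner 'for j in range(0, length)' loop, with its break
def pvInnerA (clothes : List String) (i : Int) : List Int → String → String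
  | [], answer => answer
  | j :: js, answer =>
    if i ≠ j ∧ PySem.Str.len (PySem.List.pyGetD clothes i "") ≤ PySem.Str.len (PySem.List.pyGetD clothes j "") then
      if PySem.List.pyGetD clothes i "" =
          PySem.Str.slice (PySem.List.pyGetD clothes j "") none (some (PySem.Str.len (PySem.List.pyGetD clothes i ""))) then
        "false"
      else pvInnerA clothes i js answer
    else pvInnerA clothes i js answer

-- outer 'for i in range(0, length)' loop, with its 'if answer == "false": break'
def pvOuterA (clothes : List String) (n : Int) : List Int → String → String
  | [], answer => answer
  | i :: is, answer =>
    if answer = "false" then answer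
    else pvOuterA clothes n is (pvInnerA clothes i (PySem.List.pyRange 0 n 1) answer)

def solution (clothes : List String) : String :=
  pvOuterA clothes (clothes.length : Int) (PySem.List.pyRange 0 (clothes.length : Int) 1) "true"

-- ===== PORT B =====
-- 'for k in range(len(t)): if t[:k] in seen: return "false"'
def pvAltInner (seen : PySem.Set String) (t : String) : List Int → Bool
  | [] => false
  | k :: ks =>
    if PySem.Set.contains seen (PySem.Str.slice t none (some k)) then true
    else pvAltInner seen t ks

-- 'for t in clothes: …'
def pvAltOuter (seen : PySem.Set String) : List String → Bool
  | [] => false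
  | t :: ts =>
    if pvAltInner seen t (PySem.List.pyRange 0 (PySem.Str.len t) 1) then true
    else pvAltOuter seen ts

def solution_alt (clothes : List String) : String :=
  let seen := PySem.Set.ofList clothes
  if PySem.Set.len seen ≠ (clothes.length : Int) then "false"
  else if pvAltOuter seen clothes then "false" else "true"

-- ===== PRECONDITION & SPEC =====
def Spec_solution (clothes : List String) (out : String) : Prop := out = solution_alt clothes
instance (clothes : List String) (out : String) : Decidable (Spec_solution clothes out) := by unfold Spec_solution; infer_instance

-- ===== CLAIM (what is proved, stated in full; the proofs are below) =====
def Claim_equal_solution : Prop := ∀ (clothes : List String), Dom_solution clothes → Spec_solution clothes (solution clothes)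

-- ===== LEMMAS AND PROOFS =====

theorem pv_exists_mem_append {α : Type} (xs ys : List α) (p : α → Prop) :
    (∃ x ∈ xs ++ ys, p x) ↔ (∃ x ∈ xs, p x) ∨ (∃ x ∈ ys, p x) := by
  simp only [List.mem_append, or_and_right, exists_or]

-- A's success condition for one (i, j) pair
def pvCondA (clothes : List String) (i j : Int) : Bool :=
  decide (i ≠ j) && decide (PySem.Str.len (PySem.List.pyGetD clothes i "") ≤ PySem.Str.len (PySem.List.pyGetD clothes j "")) &&
    decide (PySem.List.pyGetD clothes i "" =
      PySem.Str.slice (PySem.List.pyGetD clothes j "") none (some (PySem.Str.len (PySem.List.pyGetD clothes i ""))))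

theorem pvInnerA_eq (clothes : List String) (i : Int) (js : List Int) (a : String) :
    pvInnerA clothes i js a = if ∃ j ∈ js, pvCondA clothes i j = true then "false" else a := by
  induction js with
  | nil => simp [pvInnerA]
  | cons j js ih =>
    by_cases h1 : i ≠ j ∧ PySem.Str.len (PySem.List.pyGetD clothes i "") ≤ PySem.Str.len (PySem.List.pyGetD clothes j "")
    · by_cases h2 : PySem.List.pyGetD clothes i "" =
          PySem.Str.slice (PySem.List.pyGetD clothes j "") none (some (PySem.Str.len (PySem.List.pyGetD clothes i "")))
      · have hc : pvCondA clothes i j = true := by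
          simp only [pvCondA, Bool.and_eq_true, decide_eq_true_eq]
          exact ⟨⟨h1.1, h1.2⟩, h2⟩
        rw [pvInnerA, if_pos h1, if_pos h2, if_pos ⟨j, List.mem_cons_self, hc⟩]
      · have hc : ¬ (∃ j' ∈ [j], pvCondA clothes i j' = true) := by
          simp only [pvCondA, Bool.and_eq_true, decide_eq_true_eq, List.mem_singleton]
          rintro ⟨_, rfl, _, hh⟩
          exact h2 hh
        rw [pvInnerA, if_pos h1, if_neg h2, ih]
        congr 1
        rw [eq_iff_iff, ← List.singleton_append, pv_exists_mem_append]
        exact (or_iff_right hc).symm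
    · have hc : ¬ (∃ j' ∈ [j], pvCondA clothes i j' = true) := by
        simp only [pvCondA, Bool.and_eq_true, decide_eq_true_eq, List.mem_singleton]
        rintro ⟨_, rfl, ⟨hne, hle⟩, _⟩
        exact h1 ⟨hne, hle⟩
      rw [pvInnerA, if_neg h1, ih]
      congr 1
      rw [eq_iff_iff, ← List.singleton_append, pv_exists_mem_append]
      exact (or_iff_right hc).symm

theorem pvOuterA_false (clothes : List String) (n : Int) (is : List Int) :
    pvOuterA clothes n is "false" = "false" := by
  induction is with
  | nil => rfl
  | cons i is ih => simp [pvOuterA]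

theorem pvOuterA_true (clothes : List String) (n : Int) (is : List Int) :
    pvOuterA clothes n is "true" =
      if ∃ i ∈ is, ∃ j ∈ PySem.List.pyRange 0 n 1, pvCondA clothes i j = true then "false" else "true" := by
  induction is with
  | nil => simp [pvOuterA]
  | cons i is ih =>
    rw [pvOuterA, if_neg (by decide), pvInnerA_eq]
    by_cases h : ∃ j ∈ PySem.List.pyRange 0 n 1, pvCondA clothes i j = true
    · rw [if_pos h, pvOuterA_false, if_pos ⟨i, List.mem_cons_self, h⟩]
    · rw [if_neg h, ih]
      congr 1
      rw [eq_iff_iff, ← List.singleton_append, pv_exists_mem_append]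
      exact (or_iff_right (by simpa using h)).symm

theorem pvAltInner_iff (seen : PySem.Set String) (t : String) (ks : List Int) :
    pvAltInner seen t ks = true ↔
      ∃ k ∈ ks, PySem.Str.slice t none (some k) ∈ seen := by
  induction ks with
  | nil => simp [pvAltInner]
  | cons k ks ih =>
    rw [pvAltInner]
    by_cases h : PySem.Set.contains seen (PySem.Str.slice t none (some k)) = true
    · rw [if_pos h]
      exact iff_of_true rfl ⟨k, List.mem_cons_self, (PySem.Set.contains_iff _ _).mp h⟩
    · rw [if_neg h, ih]
      have h' : ¬ (∃ k' ∈ [k], PySem.Str.slice t none (some k') ∈ seen) := by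
        rintro ⟨_, hm, hin⟩
        rw [List.mem_singleton] at hm; subst hm
        exact h ((PySem.Set.contains_iff _ _).mpr hin)
      rw [← List.singleton_append, pv_exists_mem_append]
      exact (or_iff_right h').symm

theorem pvAltOuter_iff (seen : PySem.Set String) (ts : List String) :
    pvAltOuter seen ts = true ↔
      ∃ t ∈ ts, ∃ k ∈ PySem.List.pyRange 0 (PySem.Str.len t) 1,
        PySem.Str.slice t none (some k) ∈ seen := by
  induction ts with
  | nil => simp [pvAltOuter]
  | cons t ts ih =>
    rw [pvAltOuter]
    by_cases h : pvAltInner seen t (PySem.List.pyRange 0 (PySem.Str.len t) 1) = true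
    · rw [if_pos h]
      exact iff_of_true rfl ⟨t, List.mem_cons_self, (pvAltInner_iff _ _ _).mp h⟩
    · rw [if_neg h, ih]
      have h' : ¬ (∃ t' ∈ [t], ∃ k ∈ PySem.List.pyRange 0 (PySem.Str.len t') 1,
          PySem.Str.slice t' none (some k) ∈ seen) := by
        rintro ⟨_, hm, hex⟩
        rw [List.mem_singleton] at hm; subst hm
        exact h ((pvAltInner_iff _ _ _).mpr hex)
      rw [← List.singleton_append, pv_exists_mem_append]
      exact (or_iff_right h').symm

theorem pv_ofList_length_eq_iff (xs : List String) :
    (PySem.Set.ofList xs).length = xs.length ↔ xs.Nodup := by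
  induction xs with
  | nil => simp
  | cons x xs ih =>
    rw [PySem.Set.ofList_cons, List.nodup_cons]
    constructor
    · intro h
      simp only [PySem.Set.discard, List.length_cons, Nat.add_right_cancel_iff] at h
      have hd := List.length_filter_le (fun y => !y == x) (PySem.Set.ofList xs)
      have hle := PySem.Set.length_ofList_le xs
      have heq : (PySem.Set.ofList xs).length = xs.length := by omega
      have hdisc : List.filter (fun y => !y == x) (PySem.Set.ofList xs) = PySem.Set.ofList xs :=
        List.Sublist.eq_of_length List.filter_sublist (by omega)
      have hx : x ∉ xs := by
        intro hx
        have hmem : x ∈ List.filter (fun y => !y == x) (PySem.Set.ofList xs) := by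
          rw [hdisc]; exact (PySem.Set.mem_ofList xs x).mpr hx
        simp at hmem
      exact ⟨hx, ih.mp heq⟩
    · rintro ⟨hx, hnd⟩
      have hself : PySem.Set.ofList xs = xs := PySem.Set.ofList_eq_self_of_nodup xs hnd
      have hdisc : (PySem.Set.ofList xs).discard x = PySem.Set.ofList xs := by
        unfold PySem.Set.discard
        apply List.filter_eq_self.mpr
        intro a ha
        rw [hself] at ha
        rw [Bool.not_eq_true']
        apply beq_eq_false_iff_ne.mpr
        intro he
        subst he
        exact hx ha
      rw [List.length_cons, List.length_cons, hdisc, hself]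

theorem pv_slice_toList (t : String) (k : Nat) :
    (PySem.Str.slice t none (some (k : Int))).toList = t.toList.take k := by
  rw [PySem.Str.toList_slice, PySem.Chars.slice_eq_listSlice,
    PySem.List.slice_to _ (by positivity)]
  simp

-- A's pair test at in-range indices is exactly "distinct indices, prefix"
theorem pvCondA_iff (l : List String) (a b : Nat) (ha : a < l.length) (hb : b < l.length) :
    pvCondA l (a : Int) (b : Int) = true ↔ a ≠ b ∧ l[a].toList <+: l[b].toList := by
  simp only [pvCondA, Bool.and_eq_true, decide_eq_true_eq]
  rw [PySem.List.pyGetD_natCast, PySem.List.pyGetD_natCast,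
    List.getD_eq_getElem _ _ ha, List.getD_eq_getElem _ _ hb]
  constructor
  · rintro ⟨⟨hne, _⟩, heq⟩
    refine ⟨fun h => hne (by exact_mod_cast h), ?_⟩
    rw [List.prefix_iff_eq_take]
    have h2 := congrArg String.toList heq
    rwa [PySem.Str.len_eq, pv_slice_toList] at h2
  · rintro ⟨hne, hpre⟩
    refine ⟨⟨by exact_mod_cast hne, ?_⟩, ?_⟩
    · rw [PySem.Str.len_eq, PySem.Str.len_eq]
      exact_mod_cast hpre.length_le
    · apply String.toList_inj.mp
      rw [PySem.Str.len_eq, pv_slice_toList]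
      exact List.prefix_iff_eq_take.mp hpre

-- the two existence conditions coincide
theorem pv_main (l : List String) :
    (∃ i ∈ PySem.List.pyRange 0 (l.length : Int) 1, ∃ j ∈ PySem.List.pyRange 0 (l.length : Int) 1,
        pvCondA l i j = true) ↔
      (PySem.Set.len (PySem.Set.ofList l) ≠ (l.length : Int) ∨
        ∃ t ∈ l, ∃ k ∈ PySem.List.pyRange 0 (PySem.Str.len t) 1,
          PySem.Str.slice t none (some k) ∈ PySem.Set.ofList l) := by
  constructor
  · rintro ⟨i, hi, j, hj, hc⟩
    rw [PySem.List.mem_pyRange_one] at hi hj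
    obtain ⟨a, rfl⟩ := Int.eq_ofNat_of_zero_le hi.1
    obtain ⟨b, rfl⟩ := Int.eq_ofNat_of_zero_le hj.1
    have ha : a < l.length := by exact_mod_cast hi.2
    have hb : b < l.length := by exact_mod_cast hj.2
    obtain ⟨hab, hpre⟩ := (pvCondA_iff l a b ha hb).mp hc
    by_cases hEq : l[a] = l[b]
    · left
      rw [PySem.Set.len_eq, Ne, Int.natCast_inj]
      intro hlen
      have hnd := pv_ofList_length_eq_iff l |>.mp hlen
      rw [List.nodup_iff_injective_getElem] at hnd
      exact hab (congrArg Fin.val (hnd (show l[(⟨a, ha⟩ : Fin l.length)] = l[(⟨b, hb⟩ : Fin l.length)] from hEq)))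
    · right
      have htne : l[a].toList ≠ l[b].toList := fun h => hEq (String.toList_inj.mp h)
      have hlt : l[a].toList.length < l[b].toList.length := by
        rcases Nat.lt_or_ge l[a].toList.length l[b].toList.length with h | h
        · exact h
        · exact absurd (hpre.eq_of_length (Nat.le_antisymm hpre.length_le h)) htne
      refine ⟨l[b], List.getElem_mem hb, (l[a].toList.length : Int), ?_, ?_⟩
      · rw [PySem.List.mem_pyRange_one, PySem.Str.len_eq]
        exact ⟨by positivity, by exact_mod_cast hlt⟩
      · rw [PySem.Set.mem_ofList]
        have : PySem.Str.slice l[b] none (some (l[a].toList.length : Int)) = l[a] := by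
          apply String.toList_inj.mp
          rw [pv_slice_toList]
          exact (List.prefix_iff_eq_take.mp hpre).symm
        rw [this]
        exact List.getElem_mem ha
  · rintro (h1 | ⟨t, ht, k, hk, hmem⟩)
    · have hnd : ¬ l.Nodup := by
        intro hnd
        apply h1
        rw [PySem.Set.len_eq, (pv_ofList_length_eq_iff l).mpr hnd]
      rw [List.nodup_iff_injective_getElem] at hnd
      obtain ⟨x, y, hfe, hxy⟩ := Function.not_injective_iff.mp hnd
      refine ⟨((x : Nat) : Int), ?_, ((y : Nat) : Int), ?_, ?_⟩
      · rw [PySem.List.mem_pyRange_one]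
        exact ⟨by positivity, by exact_mod_cast x.isLt⟩
      · rw [PySem.List.mem_pyRange_one]
        exact ⟨by positivity, by exact_mod_cast y.isLt⟩
      · exact (pvCondA_iff l x y x.isLt y.isLt).mpr
          ⟨fun h => hxy (Fin.ext h), by rw [show l[(x:Nat)] = l[(y:Nat)] from hfe]⟩
    · rw [PySem.List.mem_pyRange_one, PySem.Str.len_eq] at hk
      obtain ⟨k', rfl⟩ := Int.eq_ofNat_of_zero_le hk.1
      have hk' : k' < t.toList.length := by exact_mod_cast hk.2
      rw [PySem.Set.mem_ofList] at hmem
      obtain ⟨a, ha, haeq⟩ := List.mem_iff_getElem.mp hmem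
      obtain ⟨b, hb, hbeq⟩ := List.mem_iff_getElem.mp ht
      have hatl : l[a].toList = t.toList.take k' := by
        rw [haeq, pv_slice_toList]
      refine ⟨(a : Int), ?_, (b : Int), ?_, ?_⟩
      · rw [PySem.List.mem_pyRange_one]
        exact ⟨by positivity, by exact_mod_cast ha⟩
      · rw [PySem.List.mem_pyRange_one]
        exact ⟨by positivity, by exact_mod_cast hb⟩
      · apply (pvCondA_iff l a b ha hb).mpr
        have hlen : l[a].toList.length = k' := by
          rw [hatl, List.length_take]
          omega
        refine ⟨?_, ?_⟩
        · intro h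
          subst h
          rw [hbeq] at hatl
          have := congrArg List.length hatl
          rw [List.length_take] at this
          omega
        · rw [hatl, hbeq]
          exact List.take_prefix _ _
-- ===== VERDICT (by name: the statement is the Claim_ definition above) =====
theorem solution_spec : Claim_equal_solution := by
  intro clothes _
  unfold Spec_solution solution solution_alt
  rw [pvOuterA_true]
  simp only []
  by_cases h1 : PySem.Set.len (PySem.Set.ofList clothes) ≠ (clothes.length : Int)
  · rw [if_pos ((pv_main clothes).mpr (Or.inl h1)), if_pos h1]
  · rw [if_neg h1]
    by_cases h2 : pvAltOuter (PySem.Set.ofList clothes) clothes = true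
    · rw [if_pos ((pv_main clothes).mpr (Or.inr ((pvAltOuter_iff _ _).mp h2))), if_pos h2]
    · rw [if_neg (fun hex => by
        rcases (pv_main clothes).mp hex with h | h
        · exact h1 h
        · exact h2 ((pvAltOuter_iff _ _).mpr h)), if_neg h2]
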